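-- pv_equiv track=rewrite | github.com/giuliop/AdvenfOfCode2023 | python/day18.py | mark_border
-- ===== SOURCE A (Python) =====
-- def move(pos, direction, length):
--     """Return the coordinates of the end of a trench of the given length
--        starting from the given position in the given direction."""
--     x, y = pos
--     if direction == 'R':
--         return (x + length, y)
--     if direction == 'L':
--         return (x - length, y)
--     if direction == 'U':
--         return (x, y - length)
--     if direction == 'D':
--         return (x, y + length)
--     raise ValueError(f'Unknown direction: {direction}')
--
-- def mark_border(commands):
--     """Take a list of (direction, length) tuples to dig the trenches and return
--        a tuple of:
--        1) the length of the border
--        2) a list of border vertices as (start, end) tuples."""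
--     start = (0, 0)
--     border_length = 0
--     vertices = [start]
--     for cmd in commands:
--         direction, move_length = cmd
--         border_length += move_length
--         end = move(start, direction, move_length)
--         vertices.append(end)
--         start = end
--     return border_length, vertices
-- ===== SOURCE B (Python) =====
-- def move(pos, direction, length):
--     """Return the coordinates of the end of a trench of the given length
--        starting from the given position in the given direction."""
--     x, y = pos
--     if direction == 'R':
--         return (x + length, y)
--     if direction == 'L':
--         return (x - length, y)
--     if direction == 'U':
--         return (x, y - length)
--     if direction == 'D':
--         return (x, y + length)
--     raise ValueError(f'Unknown direction: {direction}')
--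
-- def _vertices_from(pos, commands):
--     """Recursive prefix-scan: vertex list starting at pos."""
--     if not commands:
--         return [pos]
--     direction, length = commands[0]
--     return [pos] + _vertices_from(move(pos, direction, length), commands[1:])
--
-- def mark_border(commands):
--     border_length = sum(l for _, l in commands)
--     return border_length, _vertices_from((0, 0), commands)
-- ===== Notes on version B (the rewrite author's own statement) =====
-- stated objective: alternative
-- what changed: Replaces A's single fused stateful loop by two independent passes: a standalone sum over the lengths and a recursive prefix-scan building the vertex list.
import Mathlib
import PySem

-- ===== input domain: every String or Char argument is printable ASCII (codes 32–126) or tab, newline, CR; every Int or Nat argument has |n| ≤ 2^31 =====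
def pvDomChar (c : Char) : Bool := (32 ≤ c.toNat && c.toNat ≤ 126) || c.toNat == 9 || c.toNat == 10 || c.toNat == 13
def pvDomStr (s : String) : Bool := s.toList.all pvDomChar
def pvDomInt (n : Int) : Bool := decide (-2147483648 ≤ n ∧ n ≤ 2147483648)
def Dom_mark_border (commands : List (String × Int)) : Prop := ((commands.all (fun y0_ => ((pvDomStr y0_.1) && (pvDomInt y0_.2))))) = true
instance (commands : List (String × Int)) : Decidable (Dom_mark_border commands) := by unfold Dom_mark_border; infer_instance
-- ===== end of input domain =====

-- B changes the decomposition only: a standalone sum of the lengths plus a recursive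
-- prefix-scan for the vertices, instead of A's single fused stateful loop; same cost.

-- ===== PORT A =====
-- A's `move`; on an unknown direction Python raises ValueError (excluded by Pre_),
-- here it returns `pos` (never relied upon inside Pre_).
def moveA (pos : Int × Int) (direction : String) (length : Int) : Int × Int :=
  let x := pos.1; let y := pos.2
  if direction = "R" then (x + length, y)
  else if direction = "L" then (x - length, y)
  else if direction = "U" then (x, y - length)
  else if direction = "D" then (x, y + length)
  else pos

def mark_border (commands : List (String × Int)) : Int × (List (Int × Int)) :=
  let start : Int × Int := (0, 0)
  let s := commands.foldl
    (fun (st : Int × (Int × Int) × List (Int × Int)) cmd =>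
      -- border_length += move_length; end = move(start, direction, move_length); vertices.append(end)
      (st.1 + cmd.2, moveA st.2.1 cmd.1 cmd.2, st.2.2 ++ [moveA st.2.1 cmd.1 cmd.2]))
    (0, start, [start])
  (s.1, s.2.2)

-- ===== PORT B =====
-- B's `move` (identical text to A's in Source B), same totalization outside Pre_.
def moveB (pos : Int × Int) (direction : String) (length : Int) : Int × Int :=
  let x := pos.1; let y := pos.2
  if direction = "R" then (x + length, y)
  else if direction = "L" then (x - length, y)
  else if direction = "U" then (x, y - length)
  else if direction = "D" then (x, y + length)
  else pos

def verticesFrom (pos : Int × Int) : List (String × Int) → List (Int × Int)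
  | [] => [pos]
  | c :: rest => pos :: verticesFrom (moveB pos c.1 c.2) rest

def mark_border_alt (commands : List (String × Int)) : Int × (List (Int × Int)) :=
  ((commands.map Prod.snd).sum, verticesFrom (0, 0) commands)

-- ===== PRECONDITION & SPEC =====
-- Pre_ excludes exactly the inputs where Python A raises ValueError (an unknown
-- direction string); B raises the same exception there.
def Pre_mark_border (commands : List (String × Int)) : Prop :=
  ∀ c ∈ commands, c.1 = "R" ∨ c.1 = "L" ∨ c.1 = "U" ∨ c.1 = "D"
instance (commands : List (String × Int)) : Decidable (Pre_mark_border commands) := by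
  unfold Pre_mark_border; infer_instance

def pvWitness_mark_border : (List (String × Int)) := [("R", 2), ("D", 3)]

def Spec_mark_border (commands : List (String × Int)) (out : Int × (List (Int × Int))) : Prop := out = mark_border_alt commands
instance (commands : List (String × Int)) (out : Int × (List (Int × Int))) : Decidable (Spec_mark_border commands out) := by unfold Spec_mark_border; infer_instance

-- ===== CLAIM (what is proved, stated in full; the proofs are below) =====
def Claim_equal_mark_border : Prop := ∀ (commands : List (String × Int)), Dom_mark_border commands → Pre_mark_border commands → Spec_mark_border commands (mark_border commands)

-- ===== LEMMAS AND PROOFS =====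

theorem moveA_eq_moveB : moveA = moveB := rfl

-- Loop invariant for A's fold: starting from accumulated state
-- (bl, pos, acc ++ [pos]) the fold yields border length bl + Σ lengths and
-- vertex list acc ++ verticesFrom pos cs.
theorem fold_inv (cs : List (String × Int)) :
    ∀ (bl : Int) (pos : Int × Int) (acc : List (Int × Int)),
    cs.foldl
      (fun (st : Int × (Int × Int) × List (Int × Int)) cmd =>
        (st.1 + cmd.2, moveA st.2.1 cmd.1 cmd.2, st.2.2 ++ [moveA st.2.1 cmd.1 cmd.2]))
      (bl, pos, acc ++ [pos])
    = (bl + (cs.map Prod.snd).sum,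
       (cs.foldl (fun p c => moveA p c.1 c.2) pos),
       acc ++ verticesFrom pos cs) := by
  induction cs with
  | nil => intro bl pos acc; simp [verticesFrom]
  | cons c rest ih =>
      intro bl pos acc
      simp only [List.foldl, List.map, List.sum_cons, verticesFrom]
      have h := ih (bl + c.2) (moveA pos c.1 c.2) (acc ++ [pos])
      rw [List.append_assoc] at h
      rw [← List.append_assoc] at h
      rw [h, moveA_eq_moveB]
      simp [add_assoc]

-- ===== VERDICT (by name: the statement is the Claim_ definition above) =====
theorem mark_border_spec : Claim_equal_mark_border := by
  intro commands _ _
  show mark_border commands = mark_border_alt commands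
  have h := fold_inv commands 0 (0, 0) []
  simp only [List.nil_append] at h
  simp only [mark_border, mark_border_alt, h]
  simp
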